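-- pv_equiv track=rewrite | github.com/huanshi231-cmd/huanxi-openclaw-core | scripts/push_article.py | add_emoji
-- ===== SOURCE A (Python) =====
-- def add_emoji(text):
--     emojis = ['🌙', '💜', '🌸', '✨', '💧', '🔔', '🌿', '🦋']
--     lines = text.split('\n'); idx = 0
--     result = []
--     for line in lines:
--         if line.startswith('## '):
--             line = f"## {emojis[idx % len(emojis)]} {line[3:]}"; idx += 1
--         result.append(line)
--     return '\n'.join(result)
-- ===== SOURCE B (Python) =====
-- def add_emoji(text):
--     emojis = ['🌙', '💜', '🌸', '✨', '💧', '🔔', '🌿', '🦋']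
--     out = []
--     idx = 0
--     i = 0
--     n = len(text)
--     bol = True
--     while i < n:
--         if bol and text.startswith('## ', i):
--             out.append('## ' + emojis[idx % len(emojis)] + ' ')
--             idx += 1
--             i += 3
--             bol = False
--         else:
--             c = text[i]
--             out.append(c)
--             bol = (c == '\n')
--             i += 1
--     return ''.join(out)
-- ===== Notes on version B (the rewrite author's own statement) =====
-- stated objective: alternative
-- what changed: Replaces split-into-lines / per-line rebuild / join with a single left-to-right character scan that tracks a line-start flag and inserts the emoji in place when a header marker appears at a line start.
import Mathlib
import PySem

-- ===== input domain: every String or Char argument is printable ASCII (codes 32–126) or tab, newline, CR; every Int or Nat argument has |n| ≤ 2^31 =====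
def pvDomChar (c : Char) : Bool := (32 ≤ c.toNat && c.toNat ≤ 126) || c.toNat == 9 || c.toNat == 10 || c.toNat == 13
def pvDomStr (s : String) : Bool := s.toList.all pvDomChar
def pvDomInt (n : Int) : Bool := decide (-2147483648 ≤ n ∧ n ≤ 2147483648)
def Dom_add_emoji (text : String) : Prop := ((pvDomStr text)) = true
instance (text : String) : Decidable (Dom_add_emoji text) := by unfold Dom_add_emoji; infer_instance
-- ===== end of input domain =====

-- B replaces A's split/per-line-rebuild/join with a single character scan tracking a line-start flag; same result.

-- ===== PORT A =====
def pvEmojisA : List (List Char) := [['🌙'], ['💜'], ['🌸'], ['✨'], ['💧'], ['🔔'], ['🌿'], ['🦋']]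

def pvStepA (st : List (List Char) × Int) (line : List Char) : List (List Char) × Int :=
  if PySem.Chars.startswith line ['#', '#', ' '] then
    (st.1 ++ [['#', '#', ' '] ++ PySem.List.pyGetD pvEmojisA (PySem.Int.mod st.2 8) [] ++
        [' '] ++ PySem.Chars.slice line (some 3) none], st.2 + 1)
  else
    (st.1 ++ [line], st.2)

def add_emoji (text : String) : String :=
  String.mk (PySem.Chars.join ['\n']
    ((PySem.Chars.splitOn text.toList ['\n']).foldl pvStepA ([], 0)).1)

-- ===== PORT B =====
def pvEmojisB : List (List Char) := [['🌙'], ['💜'], ['🌸'], ['✨'], ['💧'], ['🔔'], ['🌿'], ['🦋']]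

def pvScanB (bol : Bool) (idx : Int) : List Char → List Char
  | [] => []
  | c :: rest =>
    if bol && PySem.Chars.startswith (c :: rest) ['#', '#', ' '] then
      '#' :: '#' :: ' ' ::
        (PySem.List.pyGetD pvEmojisB (PySem.Int.mod idx 8) [] ++
          ' ' :: pvScanB false (idx + 1) (rest.drop 2))
    else
      c :: pvScanB (c == '\n') idx rest
termination_by cs => cs.length
decreasing_by all_goals simp

def add_emoji_alt (text : String) : String :=
  String.mk (pvScanB true 0 text.toList)

-- ===== PRECONDITION & SPEC =====
def Spec_add_emoji (text : String) (out : String) : Prop := out = add_emoji_alt text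
instance (text : String) (out : String) : Decidable (Spec_add_emoji text out) := by unfold Spec_add_emoji; infer_instance

-- ===== CLAIM (what is proved, stated in full; the proofs are below) =====
def Claim_equal_add_emoji : Prop := ∀ (text : String), Dom_add_emoji text → Spec_add_emoji text (add_emoji text)

-- ===== LEMMAS AND PROOFS =====

-- reference line splitter on '\n' (proof-only)
def pvSplitNl : List Char → List (List Char)
  | [] => [[]]
  | c :: r => if c = '\n' then [] :: pvSplitNl r
              else match pvSplitNl r with
                   | h :: t => (c :: h) :: t
                   | [] => [[c]]

-- the per-line transform of A, with the index threaded through (proof-only)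
def pvProc (idx : Int) (line : List Char) : List Char × Int :=
  if PySem.Chars.startswith line ['#', '#', ' '] then
    (['#', '#', ' '] ++ PySem.List.pyGetD pvEmojisA (PySem.Int.mod idx 8) [] ++
        [' '] ++ PySem.Chars.slice line (some 3) none, idx + 1)
  else (line, idx)

def pvMapIdx : List (List Char) → Int → List (List Char)
  | [], _ => []
  | l :: ls, idx => (pvProc idx l).1 :: pvMapIdx ls (pvProc idx l).2

lemma pvSplitNl_ne_nil (cs : List Char) : pvSplitNl cs ≠ [] := by
  induction cs with
  | nil => simp [pvSplitNl]
  | cons c r ih =>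
    simp only [pvSplitNl]
    split
    · simp
    · cases h : pvSplitNl r <;> simp

lemma pvGo_nil (f : Nat) (cur : List Char) (acc : List (List Char)) :
    PySem.Chars.splitOn.go ['\n'] (f + 1) [] cur acc = (cur.reverse :: acc).reverse := by
  rw [PySem.Chars.splitOn.go]
  omega

lemma pvGo_nl (f : Nat) (r cur : List Char) (acc : List (List Char)) :
    PySem.Chars.splitOn.go ['\n'] (f + 1) ('\n' :: r) cur acc =
      PySem.Chars.splitOn.go ['\n'] f r [] (cur.reverse :: acc) := by
  rw [PySem.Chars.splitOn.go]
  simp [List.isPrefixOf]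

lemma pvGo_ne (f : Nat) (c : Char) (r cur : List Char) (acc : List (List Char)) (hc : c ≠ '\n') :
    PySem.Chars.splitOn.go ['\n'] (f + 1) (c :: r) cur acc =
      PySem.Chars.splitOn.go ['\n'] f r (c :: cur) acc := by
  rw [PySem.Chars.splitOn.go]
  simp [List.isPrefixOf, Ne.symm hc]

lemma pvGo_spec (fuel : Nat) (l cur : List Char) (acc : List (List Char))
    (h : l.length < fuel) :
    PySem.Chars.splitOn.go ['\n'] fuel l cur acc =
      acc.reverse ++ (pvSplitNl l).modifyHead (fun h => cur.reverse ++ h) := by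
  induction fuel generalizing l cur acc with
  | zero => omega
  | succ f ih =>
    cases l with
    | nil => rw [pvGo_nil]; simp [pvSplitNl]
    | cons c r =>
      by_cases hc : c = '\n'
      · subst hc
        rw [pvGo_nl, ih r [] (cur.reverse :: acc) (by simp at h; omega)]
        obtain ⟨hd, tl, heq⟩ := List.exists_cons_of_ne_nil (pvSplitNl_ne_nil r)
        simp [pvSplitNl, heq]
      · rw [pvGo_ne f c r cur acc hc, ih r (c :: cur) acc (by simp at h; omega)]
        obtain ⟨hd, tl, heq⟩ := List.exists_cons_of_ne_nil (pvSplitNl_ne_nil r)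
        simp [pvSplitNl, hc, heq]

lemma pvSplitOn_eq (cs : List Char) :
    PySem.Chars.splitOn cs ['\n'] = pvSplitNl cs := by
  unfold PySem.Chars.splitOn
  rw [pvGo_spec (cs.length + 1) cs [] [] (by omega)]
  obtain ⟨hd, tl, heq⟩ := List.exists_cons_of_ne_nil (pvSplitNl_ne_nil cs)
  simp [heq]

lemma pvStep_eq (acc : List (List Char)) (idx : Int) (l : List Char) :
    pvStepA (acc, idx) l = (acc ++ [(pvProc idx l).1], (pvProc idx l).2) := by
  unfold pvStepA pvProc
  split <;> simp

lemma pvFoldl_shape (ls : List (List Char)) (acc : List (List Char)) (idx : Int) :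
    (ls.foldl pvStepA (acc, idx)).1 = acc ++ pvMapIdx ls idx := by
  induction ls generalizing acc idx with
  | nil => simp [pvMapIdx]
  | cons l ls ih =>
    simp only [List.foldl_cons, pvMapIdx, pvStep_eq]
    rw [ih]
    simp

lemma pvCopy (cs rest : List Char) (idx : Int) (h : ∀ c ∈ cs, c ≠ '\n') :
    pvScanB false idx (cs ++ rest) = cs ++ pvScanB false idx rest := by
  induction cs with
  | nil => simp
  | cons c t ih =>
    have hc : c ≠ '\n' := h c (List.mem_cons_self ..)
    simp only [List.cons_append, pvScanB, Bool.false_and, Bool.false_eq_true, if_false]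
    have hcb : (c == '\n') = false := by simp [hc]
    rw [hcb, ih (fun x hx => h x (List.mem_cons_of_mem _ hx))]

lemma pvScan_nl (rest : List Char) (idx : Int) :
    pvScanB false idx ('\n' :: rest) = '\n' :: pvScanB true idx rest := by
  simp [pvScanB]

lemma pvStartswith_line (line rest : List Char) (h : '\n' ∉ line) :
    PySem.Chars.startswith (line ++ '\n' :: rest) ['#', '#', ' '] =
      PySem.Chars.startswith line ['#', '#', ' '] := by
  match line with
  | [] => simp [PySem.Chars.startswith, List.isPrefixOf]
  | [a] =>
    simp [PySem.Chars.startswith, List.isPrefixOf]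
  | [a, b] =>
    simp [PySem.Chars.startswith, List.isPrefixOf]
  | a :: b :: d :: t =>
    simp [PySem.Chars.startswith, List.isPrefixOf]

lemma pvScan_line_mid (line : List Char) (h : '\n' ∉ line) (idx : Int) (rest : List Char) :
    pvScanB true idx (line ++ '\n' :: rest) =
      (pvProc idx line).1 ++ '\n' :: pvScanB true (pvProc idx line).2 rest := by
  by_cases hs : PySem.Chars.startswith line ['#', '#', ' '] = true
  · obtain ⟨t, ht⟩ := (PySem.Chars.startswith_iff line ['#', '#', ' ']).1 hs
    subst ht
    have hnt : ∀ c ∈ t, c ≠ '\n' := by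
      intro c hc hcn; exact h (by subst hcn; simp [hc])
    unfold pvProc
    rw [if_pos hs]
    show pvScanB true idx ('#' :: '#' :: ' ' :: (t ++ '\n' :: rest)) = _
    simp only [pvScanB, List.drop]
    rw [if_pos (by simp [PySem.Chars.startswith, List.isPrefixOf])]
    rw [pvCopy t ('\n' :: rest) (idx + 1) hnt, pvScan_nl]
    simp [pysem, show pvEmojisB = pvEmojisA from rfl]
  · have hs' : PySem.Chars.startswith line ['#', '#', ' '] = false := by
      simpa using hs
    simp only [pvProc, hs', Bool.false_eq_true, if_false]
    cases line with
    | nil =>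
      simp only [List.nil_append, pvScanB]
      rw [if_neg (by simp [PySem.Chars.startswith, List.isPrefixOf])]
      simp
    | cons c t =>
      have hc : c ≠ '\n' := fun hcn => h (by simp [hcn])
      have hcb : (c == '\n') = false := by simp [hc]
      simp only [List.cons_append, pvScanB]
      rw [if_neg (by
        rw [show c :: (t ++ '\n' :: rest) = (c :: t) ++ '\n' :: rest by simp,
          pvStartswith_line (c :: t) rest h, hs']
        simp)]
      rw [hcb, pvCopy t ('\n' :: rest) idx
        (fun x hx hxn => h (by subst hxn; simp [hx])), pvScan_nl]

lemma pvScan_line_last (line : List Char) (h : '\n' ∉ line) (idx : Int) :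
    pvScanB true idx line = (pvProc idx line).1 := by
  by_cases hs : PySem.Chars.startswith line ['#', '#', ' '] = true
  · obtain ⟨t, ht⟩ := (PySem.Chars.startswith_iff line ['#', '#', ' ']).1 hs
    subst ht
    have hnt : ∀ c ∈ t, c ≠ '\n' := by
      intro c hc hcn; exact h (by subst hcn; simp [hc])
    unfold pvProc
    rw [if_pos hs]
    show pvScanB true idx ('#' :: '#' :: ' ' :: t) = _
    simp only [pvScanB, List.drop]
    rw [if_pos (by simp [PySem.Chars.startswith, List.isPrefixOf])]
    rw [show t = t ++ ([] : List Char) by simp, pvCopy t [] (idx + 1) (by simpa using hnt)]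
    simp [pvScanB, pysem, show pvEmojisB = pvEmojisA from rfl]
  · have hs' : PySem.Chars.startswith line ['#', '#', ' '] = false := by
      simpa using hs
    simp only [pvProc, hs', Bool.false_eq_true, if_false]
    cases line with
    | nil => simp [pvScanB]
    | cons c t =>
      have hc : c ≠ '\n' := fun hcn => h (by simp [hcn])
      have hcb : (c == '\n') = false := by simp [hc]
      simp only [pvScanB]
      rw [if_neg (by simp [hs'])]
      rw [hcb, show t = t ++ ([] : List Char) by simp,
        pvCopy t [] idx (fun x hx hxn => h (by subst hxn; simp [hx]))]
      simp [pvScanB]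

lemma pvSplitNl_no_nl (cs : List Char) (h : '\n' ∉ cs) : pvSplitNl cs = [cs] := by
  induction cs with
  | nil => simp [pvSplitNl]
  | cons c t ih =>
    have hc : c ≠ '\n' := fun hcn => h (by simp [hcn])
    rw [pvSplitNl, if_neg hc, ih (fun hx => h (List.mem_cons_of_mem _ hx))]

lemma pvSplitNl_append (line r : List Char) (h : '\n' ∉ line) :
    pvSplitNl (line ++ '\n' :: r) = line :: pvSplitNl r := by
  induction line with
  | nil => simp [pvSplitNl]
  | cons c t ih =>
    have hc : c ≠ '\n' := fun hcn => h (by simp [hcn])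
    rw [List.cons_append, pvSplitNl, if_neg hc,
      ih (fun hx => h (List.mem_cons_of_mem _ hx))]

lemma pvMain (n : Nat) (cs : List Char) (idx : Int) (h : cs.length ≤ n) :
    pvScanB true idx cs = PySem.Chars.join ['\n'] (pvMapIdx (pvSplitNl cs) idx) := by
  induction n generalizing cs idx with
  | zero =>
    have : cs = [] := by
      cases cs with
      | nil => rfl
      | cons a b => simp at h
    subst this
    simp [pvScanB, pvSplitNl, pvMapIdx, pvProc, PySem.Chars.join,
      PySem.Chars.startswith, List.isPrefixOf, List.intercalate]
  | succ n ih =>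
    have hdec := List.takeWhile_append_dropWhile (p := fun c => !(c == '\n')) (l := cs)
    set line := cs.takeWhile (fun c => !(c == '\n')) with hline
    have hlnl : '\n' ∉ line := by
      intro hx
      have := List.mem_takeWhile_imp hx
      simp at this
    cases hdrop : cs.dropWhile (fun c => !(c == '\n')) with
    | nil =>
      have hcs : cs = line := by rw [← hdec, hdrop, List.append_nil]
      rw [hcs, pvSplitNl_no_nl line hlnl]
      simp only [pvMapIdx]
      rw [pvScan_line_last line hlnl idx]
      simp [PySem.Chars.join, List.intercalate]
    | cons d r =>
      have hd : d = '\n' := by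
        have := List.head_dropWhile_not (fun c => !(c == '\n')) (l := cs) (by simp [hdrop])
        simpa [hdrop] using this
      subst hd
      have hcs : cs = line ++ '\n' :: r := by rw [← hdec, hdrop]
      have hr : r.length ≤ n := by
        have : cs.length = line.length + (r.length + 1) := by
          rw [hcs]; simp
        omega
      rw [hcs, pvSplitNl_append line r hlnl]
      simp only [pvMapIdx]
      rw [pvScan_line_mid line hlnl idx r, ih r (pvProc idx line).2 hr]
      obtain ⟨hd2, tl2, heq⟩ := List.exists_cons_of_ne_nil (pvSplitNl_ne_nil r)
      rw [heq]
      simp only [pvMapIdx]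
      rw [PySem.Chars.join_cons_cons]
      simp

-- ===== VERDICT (by name: the statement is the Claim_ definition above) =====
theorem add_emoji_spec : Claim_equal_add_emoji := by
  intro text _
  unfold Spec_add_emoji add_emoji add_emoji_alt
  rw [pvSplitOn_eq, pvFoldl_shape, List.nil_append,
    ← pvMain (text.toList.length) text.toList 0 le_rfl]
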